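-- pv_equiv track=rewrite | github.com/Thomas25504/Python_Platformer | Pygame Platformer/main.py | compute_unlocked_upto
-- ===== SOURCE A (Python) =====
-- def compute_unlocked_upto(completed_levels: set[int], unlock_all: bool, max_level: int) -> int:
--     if unlock_all:
--         return max_level
--
--     i = 1
--     while i in completed_levels:
--         i += 1
--
--     unlocked = min(i, max_level)
--     return max(unlocked, 1)
-- ===== SOURCE B (Python) =====
-- def compute_unlocked_upto(completed_levels: set[int], unlock_all: bool, max_level: int) -> int:
--     if unlock_all:
--         return max_level
--
--     expected = 1
--     for x in sorted(completed_levels):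
--         if x == expected:
--             expected += 1
--         elif x > expected:
--             break
--
--     unlocked = min(expected, max_level)
--     return max(unlocked, 1)
-- ===== Notes on version B (the rewrite author's own statement) =====
-- stated objective: alternative
-- what changed: Replaces A's while-loop of repeated membership probes with a sort of completed_levels followed by a single pass that advances an 'expected' counter, skipping elements below it and stopping at the first gap.
import Mathlib
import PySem

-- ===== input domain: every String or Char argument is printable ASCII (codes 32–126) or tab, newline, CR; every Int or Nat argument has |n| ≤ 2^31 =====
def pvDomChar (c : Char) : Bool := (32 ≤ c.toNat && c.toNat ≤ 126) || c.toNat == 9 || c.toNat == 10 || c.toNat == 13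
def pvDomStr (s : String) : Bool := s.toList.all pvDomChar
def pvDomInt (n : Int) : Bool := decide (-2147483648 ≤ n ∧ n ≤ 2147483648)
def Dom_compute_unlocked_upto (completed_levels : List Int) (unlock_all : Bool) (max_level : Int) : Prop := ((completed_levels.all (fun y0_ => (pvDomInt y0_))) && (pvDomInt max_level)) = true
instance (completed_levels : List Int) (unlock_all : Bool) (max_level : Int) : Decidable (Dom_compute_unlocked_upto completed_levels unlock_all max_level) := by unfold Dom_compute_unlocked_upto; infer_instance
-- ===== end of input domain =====

-- B replaces A's membership-probing while-loop by sort + one pass with an 'expected' counter (alternative decomposition).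

-- ===== PORT A =====
-- termination helper for the while-loop: the number of elements ≥ i strictly drops when i ∈ s and i increments
theorem pvFiltMono (s : List Int) (i : Int) :
    (s.filter (fun x => decide (i + 1 ≤ x))).length ≤ (s.filter (fun x => decide (i ≤ x))).length := by
  induction s with
  | nil => simp
  | cons a t ih =>
    simp only [List.filter_cons]
    split_ifs with h1 h2 h2 <;> simp_all <;> omega

theorem pvFiltLt (s : List Int) (i : Int) (h : i ∈ s) :
    (s.filter (fun x => decide (i + 1 ≤ x))).length < (s.filter (fun x => decide (i ≤ x))).length := by
  induction s with
  | nil => simp at h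
  | cons a t ih =>
    simp only [List.filter_cons]
    rcases List.mem_cons.mp h with h | h
    · subst h
      have := pvFiltMono t i
      split_ifs with h1 h2 h2 <;> simp_all <;> omega
    · have := ih h
      split_ifs with h1 h2 h2 <;> simp_all <;> omega

-- 'while i in completed_levels: i += 1'
def auLoop (s : List Int) (i : Int) : Int :=
  if i ∈ s then auLoop s (i + 1) else i
termination_by (s.filter (fun x => decide (i ≤ x))).length
decreasing_by exact pvFiltLt s i (by assumption)

def compute_unlocked_upto (completed_levels : List Int) (unlock_all : Bool) (max_level : Int) : Int :=
  if unlock_all then max_level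
  else
    let i := auLoop completed_levels 1
    let unlocked := min i max_level
    max unlocked 1

-- ===== PORT B =====
-- 'for x in sorted(completed_levels): if x == expected: expected += 1 elif x > expected: break'
def altLoop (expected : Int) : List Int → Int
  | [] => expected
  | x :: rest =>
    if x = expected then altLoop (expected + 1) rest
    else if expected < x then expected
    else altLoop expected rest

def compute_unlocked_upto_alt (completed_levels : List Int) (unlock_all : Bool) (max_level : Int) : Int :=
  if unlock_all then max_level
  else
    let i := altLoop 1 (PySem.List.sorted completed_levels (fun x => x) false)
    let unlocked := min i max_level
    max unlocked 1

-- ===== PRECONDITION & SPEC =====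
def Spec_compute_unlocked_upto (completed_levels : List Int) (unlock_all : Bool) (max_level : Int) (out : Int) : Prop := out = compute_unlocked_upto_alt completed_levels unlock_all max_level
instance (completed_levels : List Int) (unlock_all : Bool) (max_level : Int) (out : Int) : Decidable (Spec_compute_unlocked_upto completed_levels unlock_all max_level out) := by unfold Spec_compute_unlocked_upto; infer_instance

-- ===== CLAIM (what is proved, stated in full; the proofs are below) =====
def Claim_equal_compute_unlocked_upto : Prop := ∀ (completed_levels : List Int) (unlock_all : Bool) (max_level : Int), Dom_compute_unlocked_upto completed_levels unlock_all max_level → Spec_compute_unlocked_upto completed_levels unlock_all max_level (compute_unlocked_upto completed_levels unlock_all max_level)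

-- ===== LEMMAS AND PROOFS =====

-- A's loop result: at least i, not a member, and every j in [i, result) is a member
theorem auLoop_ge (s : List Int) (i : Int) : i ≤ auLoop s i := by
  fun_induction auLoop with
  | case1 i h ih => omega
  | case2 i h => omega

theorem auLoop_not_mem (s : List Int) (i : Int) : auLoop s i ∉ s := by
  fun_induction auLoop with
  | case1 i h ih => exact ih
  | case2 i h => exact h

theorem auLoop_mem_of_lt (s : List Int) (i : Int) :
    ∀ j, i ≤ j → j < auLoop s i → j ∈ s := by
  fun_induction auLoop with
  | case1 i h ih =>
    intro j hj1 hj2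
    rcases eq_or_lt_of_le hj1 with h' | h'
    · exact h' ▸ h
    · exact ih j (by omega) hj2
  | case2 i h => intro j hj1 hj2; omega

-- B's loop result on a sorted list: same three properties, w.r.t. membership in the list
theorem altLoop_ge (e : Int) (l : List Int) : e ≤ altLoop e l := by
  induction l generalizing e with
  | nil => simp [altLoop]
  | cons x rest ih =>
    simp only [altLoop]
    split_ifs with h1 h2
    · have := ih (e + 1); omega
    · omega
    · exact ih e

theorem altLoop_not_mem (e : Int) (l : List Int) (hs : l.Pairwise (· ≤ ·)) :
    altLoop e l ∉ l := by
  induction l generalizing e with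
  | nil => simp [altLoop]
  | cons x rest ih =>
    rcases List.pairwise_cons.mp hs with ⟨hx, hrest⟩
    simp only [altLoop]
    split_ifs with h1 h2
    · have hge := altLoop_ge (e + 1) rest
      have := ih (e + 1) hrest
      simp only [List.mem_cons]
      push Not
      exact ⟨by omega, this⟩
    · simp only [List.mem_cons]
      push Not
      refine ⟨by omega, fun hm => ?_⟩
      have := hx _ hm; omega
    · have := ih e hrest
      have hge := altLoop_ge e rest
      simp only [List.mem_cons]
      push Not
      exact ⟨by omega, this⟩

theorem altLoop_mem_of_lt (e : Int) (l : List Int) (hs : l.Pairwise (· ≤ ·)) :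
    ∀ j, e ≤ j → j < altLoop e l → j ∈ l := by
  induction l generalizing e with
  | nil => intro j h1 h2; simp [altLoop] at h2; omega
  | cons x rest ih =>
    rcases List.pairwise_cons.mp hs with ⟨hx, hrest⟩
    intro j h1 h2
    simp only [altLoop] at h2
    split_ifs at h2 with hc1 hc2
    · rcases eq_or_lt_of_le h1 with h' | h'
      · exact List.mem_cons.mpr (Or.inl (by omega))
      · exact List.mem_cons.mpr (Or.inr (ih (e + 1) hrest j (by omega) h2))
    · omega
    · exact List.mem_cons.mpr (Or.inr (ih e hrest j h1 h2))

-- the two loops compute the same value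
theorem loops_eq (s : List Int) :
    auLoop s 1 = altLoop 1 (PySem.List.sorted s (fun x => x) false) := by
  set l := PySem.List.sorted s (fun x => x) false with hl
  have hmem : ∀ j : Int, j ∈ l ↔ j ∈ s := fun j => PySem.List.mem_sorted s (fun x => x) false j
  have hs : l.Pairwise (· ≤ ·) := PySem.List.sorted_pairwise s (fun x => x)
  rcases lt_trichotomy (auLoop s 1) (altLoop 1 l) with h | h | h
  · have hm : auLoop s 1 ∈ l :=
      altLoop_mem_of_lt 1 l hs _ (auLoop_ge s 1) h
    exact absurd ((hmem _).mp hm) (auLoop_not_mem s 1)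
  · exact h
  · have hm : altLoop 1 l ∈ s :=
      auLoop_mem_of_lt s 1 _ (altLoop_ge 1 l) h
    exact absurd ((hmem _).mpr hm) (altLoop_not_mem 1 l hs)

-- ===== VERDICT (by name: the statement is the Claim_ definition above) =====
theorem compute_unlocked_upto_spec : Claim_equal_compute_unlocked_upto := by
  intro completed_levels unlock_all max_level _
  unfold Spec_compute_unlocked_upto compute_unlocked_upto compute_unlocked_upto_alt
  rw [loops_eq]
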